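-- pv_equiv track=rewrite | github.com/hw0603/gAlgorithm | week13/25571/hjk0761/25571.py | find
-- ===== SOURCE A (Python) =====
-- def count(left, right):
--     return (right - left) * (right - left - 1) // 2
--
-- def find(li):
--     result = 0
--
--     left, right = 0, 0
--
--     while right <= len(li):
--         if right == len(li):
--             result += count(left, right)
--             break
--         if left >= right:
--             right += 1
--             continue
--         if right - left == 1:
--             if li[left] != li[right]:
--                 right += 1
--             else:
--                 left += 1
--         else:
--             if (li[right-2] - li[right-1]) * (li[right-1] - li[right]) < 0:
--                 right += 1
--             else:
--                 result += count(left, right)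
--                 left = right - 1
--     return result
-- ===== SOURCE B (Python) =====
-- def find(li):
--     result = 0
--     cur = 1
--     for i in range(1, len(li)):
--         if li[i-1] == li[i]:
--             cur = 1
--         elif i >= 2 and (li[i-2] - li[i-1]) * (li[i-1] - li[i]) < 0:
--             cur += 1
--         else:
--             cur = 2
--         result += cur - 1
--     return result
-- ===== Notes on version B (the rewrite author's own statement) =====
-- stated objective: simpler
-- what changed: Replaces A's two-pointer window with deferred triangular counts (count helper, break/continue control flow) by a single forward for-loop that keeps only the length of the alternating run ending at the current index and adds its contribution immediately.
import Mathlib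
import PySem

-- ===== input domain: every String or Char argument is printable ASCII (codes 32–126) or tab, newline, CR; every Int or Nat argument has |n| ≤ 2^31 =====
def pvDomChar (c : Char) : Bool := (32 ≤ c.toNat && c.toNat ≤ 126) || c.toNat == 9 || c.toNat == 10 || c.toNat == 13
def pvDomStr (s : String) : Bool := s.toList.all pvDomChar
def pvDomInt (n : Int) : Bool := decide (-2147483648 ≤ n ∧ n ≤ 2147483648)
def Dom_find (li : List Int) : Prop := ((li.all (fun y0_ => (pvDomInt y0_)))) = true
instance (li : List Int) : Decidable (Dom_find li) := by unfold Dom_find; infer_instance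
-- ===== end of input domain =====

-- B replaces A's two-pointer window-and-count scheme by a single forward pass that keeps only
-- the length of the alternating run ending at the current index (objective: simpler).

-- ===== PORT A =====
def countA (left right : Nat) : Int :=
  PySem.Int.floordiv (((right : Int) - left) * ((right : Int) - left - 1)) 2

-- the while loop of A; indices are Nat and always in range when read (left < right < len)
def findLoopA (li : List Int) (left right : Nat) (result : Int) : Int :=
  if _h1 : right ≤ li.length then
    if right = li.length then result + countA left right
    else if _h2 : left ≥ right then findLoopA li left (right+1) result
    else if right - left = 1 then
      if li.getD left 0 ≠ li.getD right 0 then findLoopA li left (right+1) result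
      else findLoopA li (left+1) right result
    else
      if (li.getD (right-2) 0 - li.getD (right-1) 0) * (li.getD (right-1) 0 - li.getD right 0) < 0 then
        findLoopA li left (right+1) result
      else findLoopA li (right-1) right (result + countA left right)
  else result
termination_by 2 * (li.length + 1 - right) + (right - left)
decreasing_by all_goals omega

def find (li : List Int) : Int := findLoopA li 0 0 0

-- ===== PORT B =====
-- the for-loop of B: i runs from 1 to len-1, cur is the alternating-run length ending at i
def findAltLoop (li : List Int) (i : Nat) (cur : Int) (result : Int) : Int :=
  if i < li.length then
    let cur' : Int :=
      if li.getD (i-1) 0 = li.getD i 0 then 1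
      else if 2 ≤ i ∧ (li.getD (i-2) 0 - li.getD (i-1) 0) * (li.getD (i-1) 0 - li.getD i 0) < 0 then
        cur + 1
      else 2
    findAltLoop li (i+1) cur' (result + (cur' - 1))
  else result
termination_by li.length - i
decreasing_by omega

def find_alt (li : List Int) : Int := findAltLoop li 1 1 0

-- ===== PRECONDITION & SPEC =====
def Spec_find (li : List Int) (out : Int) : Prop := out = find_alt li
instance (li : List Int) (out : Int) : Decidable (Spec_find li out) := by unfold Spec_find; infer_instance

-- ===== CLAIM (what is proved, stated in full; the proofs are below) =====
def Claim_equal_find : Prop := ∀ (li : List Int), Dom_find li → Spec_find li (find li)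

-- ===== LEMMAS AND PROOFS =====

-- accumulator additivity for B's loop
theorem altAdd (li : List Int) (i : Nat) (cur res : Int) :
    findAltLoop li i cur res = res + findAltLoop li i cur 0 := by
  conv_lhs => rw [findAltLoop]
  conv_rhs => rw [findAltLoop]
  split
  · rw [altAdd li (i+1) _ (res + _), altAdd li (i+1) _ (0 + _)]
    ring
  · ring
termination_by li.length - i
decreasing_by all_goals omega

-- the "no strict alternation arriving at i" side condition
def Qc (li : List Int) (i : Nat) : Prop :=
  i < 2 ∨ 0 ≤ (li.getD (i-2) 0 - li.getD (i-1) 0) * (li.getD (i-1) 0 - li.getD i 0)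

-- under Qc, B's step at i does not look at cur
theorem curIrrel (li : List Int) (i : Nat) (c c' res : Int) (hq : Qc li i) :
    findAltLoop li i c res = findAltLoop li i c' res := by
  conv_lhs => rw [findAltLoop]
  conv_rhs => rw [findAltLoop]
  split
  · have hcond : ¬ (2 ≤ i ∧ (li.getD (i-2) 0 - li.getD (i-1) 0) * (li.getD (i-1) 0 - li.getD i 0) < 0) := by
      rcases hq with h | h
      · omega
      · intro ⟨_, h2⟩; omega
    by_cases he : li.getD (i-1) 0 = li.getD i 0
    · simp only [he, if_pos]
    · simp only [if_neg he, if_neg hcond]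
  · rfl

theorem loopB_term (li : List Int) (i : Nat) (c res : Int) (h : li.length ≤ i) :
    findAltLoop li i c res = res := by
  rw [findAltLoop]; simp [Nat.not_lt.mpr h]

theorem altStep_eq (li : List Int) (i : Nat) (c : Int) (h : i < li.length)
    (heq : li.getD (i-1) 0 = li.getD i 0) :
    findAltLoop li i c 0 = findAltLoop li (i+1) 1 0 := by
  conv_lhs => rw [findAltLoop]
  simp only [if_pos h, heq, if_pos]
  rw [altAdd]; ring_nf

theorem altStep_up (li : List Int) (i : Nat) (c : Int) (h : i < li.length)
    (heq : ¬ li.getD (i-1) 0 = li.getD i 0)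
    (hc : 2 ≤ i ∧ (li.getD (i-2) 0 - li.getD (i-1) 0) * (li.getD (i-1) 0 - li.getD i 0) < 0) :
    findAltLoop li i c 0 = c + findAltLoop li (i+1) (c+1) 0 := by
  conv_lhs => rw [findAltLoop]
  simp only [if_pos h, if_neg heq, if_pos hc]
  rw [altAdd]; ring

theorem altStep_two (li : List Int) (i : Nat) (c : Int) (h : i < li.length)
    (heq : ¬ li.getD (i-1) 0 = li.getD i 0)
    (hc : ¬ (2 ≤ i ∧ (li.getD (i-2) 0 - li.getD (i-1) 0) * (li.getD (i-1) 0 - li.getD i 0) < 0)) :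
    findAltLoop li i c 0 = 1 + findAltLoop li (i+1) 2 0 := by
  conv_lhs => rw [findAltLoop]
  simp only [if_pos h, if_neg heq, if_neg hc]
  rw [altAdd]; ring_nf

theorem loopA_term (li : List Int) (left right : Nat) (res : Int) (h : right = li.length) :
    findLoopA li left right res = res + countA left right := by
  rw [findLoopA]; simp [h]

theorem tri (k : Int) : (k+1)*k/2 = k*(k-1)/2 + k := by
  obtain ⟨m, hm⟩ := Int.even_mul_succ_self (k-1)
  have h1 : k*(k-1) = 2*m := by linear_combination hm
  have h2 : (k+1)*k = 2*(m+k) := by linear_combination hm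
  rw [h1, h2, Int.mul_ediv_cancel_left _ (by norm_num : (2:Int) ≠ 0),
      Int.mul_ediv_cancel_left _ (by norm_num : (2:Int) ≠ 0)]

theorem countA_succ (l r : Nat) (_h : l ≤ r) : countA l (r+1) = countA l r + ((r:Int) - l) := by
  unfold countA
  rw [PySem.Int.floordiv_eq_ediv_of_pos (by norm_num),
      PySem.Int.floordiv_eq_ediv_of_pos (by norm_num)]
  push_cast
  have e : ((r:Int) + 1 - l) * ((r:Int) + 1 - l - 1) = (((r:Int) - l) + 1) * ((r:Int) - l) := by ring
  rw [e, tri ((r:Int) - l)]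

theorem countA_pred (r : Nat) (_h : 1 ≤ r) : countA (r-1) r = 0 := by
  unfold countA
  rw [PySem.Int.floordiv_eq_ediv_of_pos (by norm_num)]
  have hc : ((r-1:Nat):Int) = (r:Int) - 1 := by omega
  rw [hc]
  have e : ((r:Int) - ((r:Int) - 1)) * ((r:Int) - ((r:Int) - 1) - 1) = 0 := by ring
  rw [e]
  norm_num

theorem countA_pred2 (r : Nat) (_h : 1 ≤ r) : countA (r-1) (r+1) = 1 := by
  unfold countA
  rw [PySem.Int.floordiv_eq_ediv_of_pos (by norm_num)]
  have hc : ((r-1:Nat):Int) = (r:Int) - 1 := by omega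
  push_cast
  rw [hc]
  have e : ((r:Int) + 1 - ((r:Int) - 1)) * ((r:Int) + 1 - ((r:Int) - 1) - 1) = 2 := by ring
  rw [e]
  norm_num

-- the joint simulation invariant, by induction on the remaining length n = len - right:
--  W1:  a width-1 window state (right-1, right) with Qc equals B's loop from i = right with cur = 1
--  Main: a width-≥2 window state (left, right) equals the pending count plus B's loop from i = right with cur = right-left
theorem combo (li : List Int) (n : Nat) : ∀ (right : Nat), li.length ≤ right + n →
    ((1 ≤ right → right ≤ li.length → Qc li right →
        ∀ res, findLoopA li (right-1) right res = res + findAltLoop li right 1 0) ∧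
     (∀ left, left + 2 ≤ right → right ≤ li.length →
        ∀ res, findLoopA li left right res
          = res + countA left right + findAltLoop li right ((right : Int) - (left : Int)) 0)) := by
  induction n with
  | zero =>
    intro right hn
    constructor
    · intro h1 hr _ res
      have hEq : right = li.length := by omega
      rw [loopA_term li _ _ _ hEq, loopB_term li _ _ _ (by omega)]
      rw [countA_pred right h1]
    · intro left _ hr res
      have hEq : right = li.length := by omega
      rw [loopA_term li _ _ _ hEq, loopB_term li _ _ _ (by omega)]
      ring
  | succ n ih =>
    intro right hn
    have w1 : 1 ≤ right → right ≤ li.length → Qc li right →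
        ∀ res, findLoopA li (right-1) right res = res + findAltLoop li right 1 0 := by
      intro h1 hr hq res
      by_cases hR : right = li.length
      · rw [loopA_term li _ _ _ hR, loopB_term li _ _ _ (by omega)]
        rw [countA_pred right h1]
      · have hlt : right < li.length := by omega
        rw [findLoopA]
        rw [dif_pos (by omega : right ≤ li.length), if_neg hR,
            dif_neg (by omega : ¬ (right - 1 ≥ right)),
            if_pos (by omega : right - (right - 1) = 1)]
        by_cases heq : li.getD (right-1) 0 = li.getD right 0
        · rw [if_neg (not_not_intro heq)]
          have hs : right - 1 + 1 = right := by omega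
          rw [hs]
          -- A is now at the transient state (right, right): left ≥ right, so right advances
          rw [findLoopA]
          rw [dif_pos (by omega : right ≤ li.length), if_neg hR, dif_pos (le_refl right)]
          have hq' : Qc li (right+1) := by
            right
            have e1 : right + 1 - 2 = right - 1 := by omega
            have e2 : right + 1 - 1 = right := by omega
            rw [e1, e2, heq]
            simp
          have := ((ih (right+1) (by omega)).1 (by omega) (by omega) hq' res)
          have hs2 : right + 1 - 1 = right := by omega
          rw [hs2] at this
          rw [this, altStep_eq li right 1 hlt heq]
        · rw [if_pos heq]
          have := ((ih (right+1) (by omega)).2 (right-1) (by omega) (by omega) res)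
          rw [this]
          have hcast : ((right:Int) + 1 - ((right-1 : Nat) : Int)) = 2 := by
            have : ((right - 1 : Nat) : Int) = (right : Int) - 1 := by omega
            rw [this]; ring
          have hcnt : countA (right-1) (right+1) = 1 := countA_pred2 right (by omega)
          push_cast
          rw [hcast, hcnt]
          have hnc : ¬ (2 ≤ right ∧ (li.getD (right-2) 0 - li.getD (right-1) 0) * (li.getD (right-1) 0 - li.getD right 0) < 0) := by
            rcases hq with h | h
            · omega
            · intro ⟨_, h2⟩; omega
          rw [altStep_two li right 1 hlt heq hnc]
          ring
    refine ⟨w1, ?_⟩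
    intro left hw hr res
    by_cases hR : right = li.length
    · rw [loopA_term li _ _ _ hR, loopB_term li _ _ _ (by omega)]; ring
    · have hlt : right < li.length := by omega
      rw [findLoopA]
      rw [dif_pos (by omega : right ≤ li.length), if_neg hR,
          dif_neg (by omega : ¬ (left ≥ right)),
          if_neg (by omega : ¬ (right - left = 1))]
      by_cases heq : li.getD (right-1) 0 = li.getD right 0
      · have hp0 : (li.getD (right-2) 0 - li.getD (right-1) 0) * (li.getD (right-1) 0 - li.getD right 0) = 0 := by
          rw [heq]; ring
        rw [if_neg (by omega : ¬ (li.getD (right-2) 0 - li.getD (right-1) 0) * (li.getD (right-1) 0 - li.getD right 0) < 0)]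
        have hq : Qc li right := by right; omega
        rw [w1 (by omega) hr hq (res + countA left right)]
        rw [curIrrel li right ((right:Int) - (left:Int)) 1 0 hq]
      · by_cases hprod : (li.getD (right-2) 0 - li.getD (right-1) 0) * (li.getD (right-1) 0 - li.getD right 0) < 0
        · rw [if_pos hprod]
          have := ((ih (right+1) (by omega)).2 left (by omega) (by omega) res)
          rw [this, countA_succ left right (by omega)]
          rw [altStep_up li right ((right:Int) - (left:Int)) hlt heq ⟨by omega, hprod⟩]
          have : ((right:Int) - (left:Int)) + 1 = (((right+1 : Nat)) : Int) - (left : Int) := by push_cast; ring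
          rw [this]
          push_cast
          ring
        · rw [if_neg hprod]
          have hq : Qc li right := by right; omega
          rw [w1 (by omega) hr hq (res + countA left right)]
          rw [curIrrel li right ((right:Int) - (left:Int)) 1 0 hq]

theorem countA_zero (l : Nat) : countA l l = 0 := by
  unfold countA
  rw [PySem.Int.floordiv_eq_ediv_of_pos (by norm_num)]
  have e : ((l:Int) - l) * ((l:Int) - l - 1) = 0 := by ring
  rw [e]
  norm_num

theorem find_eq (li : List Int) : find li = find_alt li := by
  unfold find find_alt
  by_cases h0 : li.length = 0
  · rw [findLoopA]
    rw [dif_pos (by omega : 0 ≤ li.length), if_pos h0.symm, countA_zero,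
        loopB_term li 1 1 0 (by omega)]
    norm_num
  · rw [findLoopA]
    rw [dif_pos (by omega : 0 ≤ li.length), if_neg (by omega : ¬ (0 = li.length)),
        dif_pos (le_refl 0)]
    have := ((combo li li.length (0+1) (by omega)).1 (by omega) (by omega) (Or.inl (by omega)) 0)
    simpa using this

-- ===== VERDICT (by name: the statement is the Claim_ definition above) =====
theorem find_spec : Claim_equal_find := by
  intro li _
  unfold Spec_find
  exact find_eq li
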